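-- pv_equiv track=rewrite | github.com/dmshirochenko/algorithmic_trainings | yandex_algo_6_0/part_2/F. Сумма тройных произведений_Optimized.py | triple_product
-- ===== SOURCE A (Python) =====
-- def triple_product(nums):
--     n = len(nums)
--
--     prefix_sum = [0] * n #prefix sum of nums
--     prefix_sum[0] = nums[0]
--
--     #calculate prefix sum and prefix square sum
--     for i in range(1, n):
--         prefix_sum[i] = prefix_sum[i - 1] + nums[i]
--
--     total_sum = 0
--     suffix_sum = 0
--
--     for j in range(n - 2, 0, -1):
--         suffix_sum += nums[j + 1]
--
--         left_sum = prefix_sum[j - 1]  # Sum of elements before j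
--         total_sum += nums[j] * (left_sum * suffix_sum)
--
--     return total_sum % 1000000007
-- ===== SOURCE B (Python) =====
-- def triple_product(nums):
--     s1 = nums[0]
--     s2 = nums[0] * nums[0]
--     s3 = s2 * nums[0]
--     for x in nums[1:]:
--         s1 += x
--         s2 += x * x
--         s3 += x * x * x
--     return (s1 ** 3 - 3 * s1 * s2 + 2 * s3) // 6 % 1000000007
-- ===== Notes on version B (the rewrite author's own statement) =====
-- stated objective: alternative
-- what changed: Replaces A's prefix-sum array plus backward suffix loop (summing middle-element contributions) with three running power sums in one forward pass and the closed form e3 = (s1**3 - 3*s1*s2 + 2*s3)//6.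
import Mathlib
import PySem

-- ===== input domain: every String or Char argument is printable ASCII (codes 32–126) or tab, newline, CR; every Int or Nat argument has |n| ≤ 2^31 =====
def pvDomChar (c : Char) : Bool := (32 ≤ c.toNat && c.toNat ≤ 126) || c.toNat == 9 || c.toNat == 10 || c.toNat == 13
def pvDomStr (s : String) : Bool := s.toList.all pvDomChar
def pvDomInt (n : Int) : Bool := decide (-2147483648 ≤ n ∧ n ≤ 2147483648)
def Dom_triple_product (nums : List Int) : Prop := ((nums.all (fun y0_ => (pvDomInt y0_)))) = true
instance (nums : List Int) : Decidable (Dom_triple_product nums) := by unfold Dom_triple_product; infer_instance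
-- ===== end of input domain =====

-- B replaces A's prefix array + backward suffix pass with power sums and Newton's identity; alternative, same O(n) cost.

-- ===== PORT A =====
def triple_product (nums : List Int) : Int :=
  let n : Int := nums.length
  let prefix0 : List Int :=
    PySem.List.pySetD (List.replicate nums.length (0 : Int)) 0 (PySem.List.pyGetD nums 0 0)
  let prefixSum : List Int :=
    (PySem.List.pyRange 1 n 1).foldl
      (fun p i => PySem.List.pySetD p i (PySem.List.pyGetD p (i - 1) 0 + PySem.List.pyGetD nums i 0)) prefix0
  let st : Int × Int :=
    (PySem.List.pyRange (n - 2) 0 (-1)).foldl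
      (fun (st : Int × Int) j =>
        let s := st.2 + PySem.List.pyGetD nums (j + 1) 0
        (st.1 + PySem.List.pyGetD nums j 0 * (PySem.List.pyGetD prefixSum (j - 1) 0 * s), s))
      (0, 0)
  PySem.Int.mod st.1 1000000007

-- ===== PORT B =====
def triple_product_alt (nums : List Int) : Int :=
  let a0 := PySem.List.pyGetD nums 0 0
  let st : Int × Int × Int :=
    (PySem.List.slice nums (some 1) none).foldl
      (fun (s : Int × Int × Int) x => (s.1 + x, s.2.1 + x * x, s.2.2 + x * x * x))
      (a0, a0 * a0, (a0 * a0) * a0)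
  PySem.Int.mod (PySem.Int.floordiv (st.1 ^ 3 - 3 * st.1 * st.2.1 + 2 * st.2.2) 6) 1000000007

-- ===== PRECONDITION & SPEC =====
-- Pre_ excludes only the empty list, on which A (and B) raise IndexError at the first-element access.
def Pre_triple_product (nums : List Int) : Prop := nums ≠ []
instance (nums : List Int) : Decidable (Pre_triple_product nums) := by unfold Pre_triple_product; infer_instance
def pvWitness_triple_product : List Int := ([1, 2, 3, 4])

def Spec_triple_product (nums : List Int) (out : Int) : Prop := out = triple_product_alt nums
instance (nums : List Int) (out : Int) : Decidable (Spec_triple_product nums out) := by unfold Spec_triple_product; infer_instance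

-- ===== CLAIM (what is proved, stated in full; the proofs are below) =====
def Claim_equal_triple_product : Prop := ∀ (nums : List Int), Dom_triple_product nums → Pre_triple_product nums → Spec_triple_product nums (triple_product nums)

-- ===== LEMMAS AND PROOFS =====

-- elementary symmetric polynomials e2, e3 (proof-side spec both ports are reduced to)
def esym2 : List Int → Int
  | [] => 0
  | x :: xs => x * xs.sum + esym2 xs

def esym3 : List Int → Int
  | [] => 0
  | x :: xs => x * esym2 xs + esym3 xs

-- ---- B side ----
theorem powsum_fold (t : List Int) : ∀ a b c : Int,
    t.foldl (fun (s : Int × Int × Int) x => (s.1 + x, s.2.1 + x * x, s.2.2 + x * x * x)) (a, b, c)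
      = (a + t.sum, b + (t.map (fun x => x * x)).sum, c + (t.map (fun x => x * x * x)).sum) := by
  induction t with
  | nil => simp
  | cons y t ih =>
    intro a b c
    simp only [List.foldl_cons, ih, List.sum_cons, List.map_cons]
    refine Prod.ext ?_ (Prod.ext ?_ ?_) <;> simp <;> ring

theorem two_esym2 (l : List Int) : 2 * esym2 l = l.sum ^ 2 - (l.map (fun x => x * x)).sum := by
  induction l with
  | nil => simp [esym2]
  | cons x xs ih => simp only [esym2, List.sum_cons, List.map_cons]; linear_combination ih

theorem six_esym3 (l : List Int) :
    6 * esym3 l = l.sum ^ 3 - 3 * l.sum * (l.map (fun x => x * x)).sum + 2 * (l.map (fun x => x * x * x)).sum := by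
  induction l with
  | nil => simp [esym3]
  | cons x xs ih =>
    simp only [esym3, List.sum_cons, List.map_cons]
    linear_combination ih + 3 * x * two_esym2 xs

theorem alt_eq_esym3 (x : Int) (t : List Int) :
    triple_product_alt (x :: t) = PySem.Int.mod (esym3 (x :: t)) 1000000007 := by
  unfold triple_product_alt
  simp only [PySem.List.pyGetD_zero_cons, PySem.List.slice_from_one, List.tail_cons, powsum_fold]
  have hs : (x + t.sum) ^ 3 - 3 * (x + t.sum) * (x * x + (t.map (fun x => x * x)).sum)
      + 2 * ((x * x) * x + (t.map (fun x => x * x * x)).sum) = 6 * esym3 (x :: t) := by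
    have h6 := six_esym3 (x :: t)
    simp only [List.sum_cons, List.map_cons] at h6
    linear_combination -h6
  rw [hs, PySem.Int.floordiv_eq_ediv_of_pos (by norm_num), Int.mul_ediv_cancel_left _ (by norm_num)]

-- ---- A side ----
def termA (l : List Int) (j : Nat) : Int := l.getD j 0 * ((l.take j).sum * (l.drop (j + 1)).sum)

theorem esym2_as_sum (l : List Int) :
    ((List.range l.length).map (fun j => l.getD j 0 * (l.drop (j + 1)).sum)).sum = esym2 l := by
  induction l with
  | nil => simp [esym2]
  | cons x xs ih =>
    rw [List.length_cons, List.range_succ_eq_map]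
    simp only [List.map_cons, List.map_map, List.sum_cons, Function.comp_def,
      List.getD_cons_zero, List.getD_cons_succ, List.drop_succ_cons, List.drop_zero]
    rw [ih]  -- placeholder; fix below
    simp [esym2]

theorem esym3_as_sum (l : List Int) :
    ((List.range l.length).map (termA l)).sum = esym3 l := by
  induction l with
  | nil => simp [esym3]
  | cons x xs ih =>
    rw [List.length_cons, List.range_succ_eq_map]
    simp only [List.map_cons, List.map_map, List.sum_cons]
    have h0 : termA (x :: xs) 0 = 0 := by simp [termA]
    have hcomp : (List.range xs.length).map (termA (x :: xs) ∘ Nat.succ)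
        = (List.range xs.length).map
            (fun j => x * (xs.getD j 0 * (xs.drop (j + 1)).sum) + termA xs j) := by
      apply List.map_congr_left
      intro j hj
      simp only [Function.comp_def, termA, List.getD_cons_succ, List.take_succ_cons,
        List.drop_succ_cons, List.sum_cons]
      ring
    rw [h0, hcomp, PySem.List.sum_map_add_int, List.sum_map_mul_left, esym2_as_sum, ih]
    simp [esym3]

theorem take_one_sum (l : List Int) : (l.take 1).sum = l.getD 0 0 := by
  cases l <;> simp

theorem take_sum_succ (l : List Int) (m : Nat) (h : m < l.length) :
    (l.take (m + 1)).sum = (l.take m).sum + l.getD m 0 := by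
  rw [List.sum_take_succ l m h, List.getD_eq_getElem _ _ h]

theorem drop_sum_succ (l : List Int) (k : Nat) (h : k < l.length) :
    (l.drop k).sum = l.getD k 0 + (l.drop (k + 1)).sum := by
  rw [List.getD_eq_getElem _ _ h, List.drop_eq_getElem_cons h, List.sum_cons]

theorem esym3_short (l : List Int) (h : l.length ≤ 2) : esym3 l = 0 := by
  match l with
  | [] => simp [esym3]
  | [_] => simp [esym3, esym2]
  | [_, _] => simp [esym3, esym2]
  | _ :: _ :: _ :: _ => simp at h

theorem prefix_loop (nums : List Int) : ∀ (t m : Nat) (p : List Int), 1 ≤ m → m + t = nums.length →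
    p.length = nums.length → (∀ i, i < m → p.getD i 0 = (nums.take (i + 1)).sum) →
    ∀ i, i < nums.length →
      (((PySem.List.pyRange (m : Int) (nums.length : Int) 1).foldl
        (fun p i => PySem.List.pySetD p i (PySem.List.pyGetD p (i - 1) 0 + PySem.List.pyGetD nums i 0)) p).getD i 0)
        = (nums.take (i + 1)).sum := by
  intro t
  induction t with
  | zero =>
    intro m p h1 ht hlen hp i hi
    rw [PySem.List.pyRange_one_eq_nil (by omega)]
    exact hp i (by omega)
  | succ t ih =>
    intro m p h1 ht hlen hp i hi
    rw [PySem.List.pyRange_one_cons (by omega), List.foldl_cons]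
    have hm : m < nums.length := by omega
    have hm1 : ((m : Int) - 1) = ((m - 1 : Nat) : Int) := by omega
    have hstep : PySem.List.pySetD p (m : Int)
          (PySem.List.pyGetD p ((m : Int) - 1) 0 + PySem.List.pyGetD nums (m : Int) 0)
        = p.set m ((nums.take (m + 1)).sum) := by
      rw [hm1]
      simp only [PySem.List.pyGetD_natCast, PySem.List.pySetD_natCast]
      rw [hp (m - 1) (by omega)]
      congr 1
      rw [Nat.sub_add_cancel h1, take_sum_succ nums m hm]
    rw [hstep]
    have hcast : ((m : Int) + 1) = ((m + 1 : Nat) : Int) := by push_cast; ring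
    rw [hcast]
    refine ih (m + 1) _ (by omega) (by omega) (by simpa using hlen) ?_ i hi
    intro k hk
    rcases Nat.lt_or_ge k m with hkm | hkm
    · rw [List.getD_eq_getElem?_getD, List.getElem?_set_ne (by omega), ← List.getD_eq_getElem?_getD]
      exact hp k hkm
    · have hkm' : k = m := by omega
      subst hkm'
      rw [List.getD_eq_getElem?_getD, List.getElem?_set_self]
      · rfl
      · omega

theorem loop_lemma (nums q : List Int)
    (hq : ∀ i, i < nums.length → q.getD i 0 = (nums.take (i + 1)).sum) :
    ∀ (m : Nat) (T : Int), m + 2 ≤ nums.length →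
    ((PySem.List.pyRange (m : Int) 0 (-1)).foldl
      (fun (st : Int × Int) j =>
        let s := st.2 + PySem.List.pyGetD nums (j + 1) 0
        (st.1 + PySem.List.pyGetD nums j 0 * (PySem.List.pyGetD q (j - 1) 0 * s), s))
      (T, (nums.drop (m + 2)).sum))
    = (T + ((List.range (m + 1)).map (termA nums)).sum, (nums.drop 2).sum) := by
  intro m
  induction m with
  | zero =>
    intro T h
    rw [PySem.List.pyRange_neg_one_eq_nil (by omega)]
    simp [termA]
  | succ m ih =>
    intro T h
    rw [PySem.List.pyRange_neg_one_cons (by omega), List.foldl_cons]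
    have e1 : (((m + 1 : Nat) : Int) + 1) = ((m + 2 : Nat) : Int) := by push_cast; ring
    have e2 : (((m + 1 : Nat) : Int) - 1) = ((m : Nat) : Int) := by omega
    simp only [e1, e2, PySem.List.pyGetD_natCast]
    have hs' : (nums.drop (m + 1 + 2)).sum + nums.getD (m + 2) 0 = (nums.drop (m + 2)).sum := by
      rw [drop_sum_succ nums (m + 2) (by omega)]
      have h32 : m + 1 + 2 = m + 2 + 1 := by omega
      rw [h32]; ring
    rw [hs', hq m (by omega)]
    have hT : T + nums.getD (m + 1) 0 * ((nums.take (m + 1)).sum * (nums.drop (m + 2)).sum)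
        = T + termA nums (m + 1) := by simp [termA]
    rw [hT, ih (T + termA nums (m + 1)) (by omega)]
    have hr : List.range (m + 1 + 1) = List.range (m + 1) ++ [m + 1] := List.range_succ
    rw [hr, List.map_append, List.sum_append]
    simp only [List.map_cons, List.map_nil, List.sum_cons, List.sum_nil]
    exact Prod.ext (by ring) rfl

theorem prefix_spec (nums : List Int) (h : 0 < nums.length) : ∀ i, i < nums.length →
    ((PySem.List.pyRange 1 (nums.length : Int) 1).foldl
      (fun p i => PySem.List.pySetD p i (PySem.List.pyGetD p (i - 1) 0 + PySem.List.pyGetD nums i 0))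
      (PySem.List.pySetD (List.replicate nums.length (0 : Int)) 0 (PySem.List.pyGetD nums 0 0))).getD i 0
    = (nums.take (i + 1)).sum := by
  intro i hi
  have h1 : ((1 : Nat) : Int) = 1 := by norm_num
  have hbase := prefix_loop nums (nums.length - 1) 1
    (PySem.List.pySetD (List.replicate nums.length (0 : Int)) 0 (PySem.List.pyGetD nums 0 0))
    (le_refl 1) (by omega) ?_ ?_ i hi
  · rw [h1] at hbase
    exact hbase
  · simp [PySem.List.pySetD_of_nonneg]
  · intro k hk
    have hk0 : k = 0 := by omega
    subst hk0
    rw [take_one_sum]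
    simp [PySem.List.pySetD_of_nonneg, List.getD_eq_getElem?_getD, h]
    rw [PySem.List.pyGetD_zero, List.getD_eq_getElem _ _ h]

theorem a_eq_esym3 (nums : List Int) (h : nums ≠ []) :
    triple_product nums = PySem.Int.mod (esym3 nums) 1000000007 := by
  have hlen : 0 < nums.length := List.length_pos_iff.mpr h
  unfold triple_product
  simp only []
  by_cases hlen2 : nums.length ≤ 2
  · rw [PySem.List.pyRange_neg_one_eq_nil (by omega)]
    rw [esym3_short nums hlen2]
    simp
  · have hc : ((nums.length : Int) - 2) = ((nums.length - 2 : Nat) : Int) := by omega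
    rw [hc]
    have h0 : ((0 : Int), (0 : Int)) = ((0 : Int), (nums.drop ((nums.length - 2) + 2)).sum) := by
      have he : nums.length - 2 + 2 = nums.length := by omega
      rw [he, List.drop_length]
      rfl
    rw [h0, loop_lemma nums _ (prefix_spec nums hlen) (nums.length - 2) 0 (by omega)]
    have he1 : nums.length - 2 + 1 = nums.length - 1 := by omega
    have hr : List.range nums.length = List.range (nums.length - 1) ++ [nums.length - 1] := by
      conv_lhs => rw [show nums.length = (nums.length - 1) + 1 by omega]
      exact List.range_succ
    have hlast : termA nums (nums.length - 1) = 0 := by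
      unfold termA
      rw [show nums.length - 1 + 1 = nums.length by omega, List.drop_length]
      simp
    have hsum : ((List.range (nums.length - 1)).map (termA nums)).sum = esym3 nums := by
      have hk := esym3_as_sum nums
      rw [hr, List.map_append, List.sum_append] at hk
      simpa [hlast] using hk
    rw [he1, hsum]
    norm_num

theorem b_eq_esym3 (nums : List Int) (h : nums ≠ []) :
    triple_product_alt nums = PySem.Int.mod (esym3 nums) 1000000007 := by
  obtain ⟨x, t, rfl⟩ := List.exists_cons_of_ne_nil h
  exact alt_eq_esym3 x t

-- ===== VERDICT (by name: the statement is the Claim_ definition above) =====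
theorem triple_product_spec : Claim_equal_triple_product := by
  intro nums _ hpre
  unfold Spec_triple_product
  rw [a_eq_esym3 nums hpre, b_eq_esym3 nums hpre]
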